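-- pv_equiv track=rewrite | github.com/JakubWorek/algorithms_and_data_structures_course | 2020-2021/KOLOKWIA/kolzal1_szablony/zad2.py | number_components
-- ===== SOURCE A (Python) =====
-- def number_components(G, is_art):
--     n = len(G)
--     numbers = [-1] * n
--     curr = 0
--
--     def dfs(u):
--         numbers[u] = curr
--         for v in range(n):
--             if G[u][v] and numbers[v] == -1 and not is_art[v]:
--                 dfs(v)
--
--     for u in range(n):
--         if numbers[u] == -1:
--             if not is_art[u]: dfs(u)
--             else: numbers[u] = curr
--             curr += 1
--
--     return numbers
-- ===== SOURCE B (Python) =====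
-- def number_components(G, is_art):
--     n = len(G)
--     numbers = [-1] * n
--     curr = 0
--     for u in range(n):
--         if numbers[u] != -1:
--             continue
--         if is_art[u]:
--             numbers[u] = curr
--         else:
--             comp = [u]
--             frontier = [u]
--             while frontier:
--                 nxt = []
--                 for x in frontier:
--                     for v in range(n):
--                         if G[x][v] and numbers[v] == -1 and v not in comp and not is_art[v]:
--                             comp.append(v)
--                             nxt.append(v)
--                 frontier = nxt
--             for v in comp:
--                 numbers[v] = curr
--         curr += 1
--     return numbers
-- ===== Notes on version B (the rewrite author's own statement) =====
-- stated objective: alternative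
-- what changed: A's recursive nested dfs that marks numbers[] while it walks is replaced by a frontier-by-frontier (level) search that first collects the whole component into a comp list without touching numbers, and then writes the label to every collected vertex in a separate pass; the outer loop uses continue instead of A's nested branches.
import Mathlib
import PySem

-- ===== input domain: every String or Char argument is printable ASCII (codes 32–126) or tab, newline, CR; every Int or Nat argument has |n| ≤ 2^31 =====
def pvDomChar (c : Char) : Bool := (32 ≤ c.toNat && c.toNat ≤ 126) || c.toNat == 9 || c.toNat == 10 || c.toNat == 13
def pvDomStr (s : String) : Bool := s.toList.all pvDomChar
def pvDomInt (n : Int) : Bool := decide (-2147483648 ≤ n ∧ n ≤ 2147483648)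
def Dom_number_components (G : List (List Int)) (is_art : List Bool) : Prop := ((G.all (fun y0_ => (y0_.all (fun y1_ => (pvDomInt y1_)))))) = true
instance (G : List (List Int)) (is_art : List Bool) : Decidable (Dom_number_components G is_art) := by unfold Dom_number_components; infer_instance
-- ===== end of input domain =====

-- B replaces A's recursive dfs (which marks numbers[] as it walks) by a level-by-level
-- frontier search that first COLLECTS the component into a list and only then writes the
-- labels in a separate pass. Objective: alternative decomposition; same labels, proved equal.

-- ===== PORT A =====
-- the nested recursive `dfs`; fuel only makes the recursion structurally total
-- (the call site passes n+1, which the proof shows is never exhausted)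
def pvDfsA (G : List (List Int)) (art : List Bool) (n : Nat) (curr : Int) :
    Nat → Nat → List Int → List Int
  | 0, _, nums => nums
  | fuel+1, u, nums =>
    (List.range n).foldl
      (fun ns v =>
        if ((G.getD u []).getD v 0 != 0) && (ns.getD v 0 == -1) && !(art.getD v false)
        then pvDfsA G art n curr fuel v ns
        else ns)
      (nums.set u curr)

def number_components (G : List (List Int)) (is_art : List Bool) : List Int :=
  ((List.range G.length).foldl
    (fun (st : List Int × Int) u =>
      if st.1.getD u 0 == -1 then
        if !(is_art.getD u false) then (pvDfsA G is_art G.length st.2 (G.length + 1) u st.1, st.2 + 1)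
        else (st.1.set u st.2, st.2 + 1)
      else st)
    (List.replicate G.length (-1), 0)).1

-- ===== PORT B =====
-- the `while frontier:` level loop of B: scans the row of every frontier vertex, appends the
-- newly discovered vertices to comp and to the next frontier; numbers (nums) is NOT written
-- here.  fuel only makes the loop structurally total (the call site passes n+1, which the
-- proof shows is never exhausted)
def pvLevelB (G : List (List Int)) (art : List Bool) (n : Nat) (nums : List Int) :
    Nat → List Nat → List Nat → List Nat
  | 0, comp, _ => comp
  | _+1, comp, [] => comp
  | fuel+1, comp, x :: rest =>
    let st := (x :: rest).foldl
      (fun (p : List Nat × List Nat) y =>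
        (List.range n).foldl
          (fun (q : List Nat × List Nat) v =>
            if ((G.getD y []).getD v 0 != 0) && (nums.getD v 0 == -1) && !(q.1.contains v)
                && !(art.getD v false)
            then (q.1 ++ [v], q.2 ++ [v])
            else q)
          p)
      (comp, [])
    pvLevelB G art n nums fuel st.1 st.2

def number_components_alt (G : List (List Int)) (is_art : List Bool) : List Int :=
  ((List.range G.length).foldl
    (fun (st : List Int × Int) u =>
      if !(st.1.getD u 0 == -1) then st
      else if is_art.getD u false then (st.1.set u st.2, st.2 + 1)
      else
        ((pvLevelB G is_art G.length st.1 (G.length + 1) [u] [u]).foldl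
          (fun ns v => ns.set v st.2) st.1, st.2 + 1))
    (List.replicate G.length (-1), 0)).1

-- ===== PRECONDITION & SPEC =====
-- Pre_ = exactly the inputs on which the Python A returns normally: is_art must cover all n
-- vertices, and the row of every non-articulation vertex must have at least n entries (those
-- rows, and only those, are fully scanned); otherwise A raises IndexError.
def Pre_number_components (G : List (List Int)) (is_art : List Bool) : Prop :=
  G.length ≤ is_art.length ∧
  ∀ u, u < G.length → is_art.getD u false = false → G.length ≤ (G.getD u []).length
instance (G : List (List Int)) (is_art : List Bool) : Decidable (Pre_number_components G is_art) := by
  unfold Pre_number_components; infer_instance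

def pvWitness_number_components : List (List Int) × List Bool :=
  ([[0, 1, 0], [1, 0, 0], [0, 0, 1]], [false, false, true])

def Spec_number_components (G : List (List Int)) (is_art : List Bool) (out : List Int) : Prop := out = number_components_alt G is_art
instance (G : List (List Int)) (is_art : List Bool) (out : List Int) : Decidable (Spec_number_components G is_art out) := by unfold Spec_number_components; infer_instance

-- ===== CLAIM (what is proved, stated in full; the proofs are below) =====
def Claim_equal_number_components : Prop := ∀ (G : List (List Int)) (is_art : List Bool), Dom_number_components G is_art → Pre_number_components G is_art → Spec_number_components G is_art (number_components G is_art)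

-- ===== LEMMAS AND PROOFS =====

-- x→v is an edge of the adjacency matrix
def pvEdge (G : List (List Int)) (x v : Nat) : Prop := (G.getD x []).getD v 0 ≠ 0

-- vertices reachable from u through edges whose targets are unvisited (= -1 in nums)
-- non-articulation vertices < n
inductive PvReach (G : List (List Int)) (art : List Bool) (n : Nat) (nums : List Int) (u : Nat) : Nat → Prop
  | refl : PvReach G art n nums u u
  | step (x v : Nat) : PvReach G art n nums u x → v < n → pvEdge G x v →
      nums.getD v 0 = -1 → art.getD v false = false → PvReach G art n nums u v

-- what one component-marking pass (A's dfs(u) / B's collect-then-write) produces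
def PvChar (G : List (List Int)) (art : List Bool) (n : Nat) (nums : List Int) (u : Nat)
    (curr : Int) (res : List Int) : Prop :=
  res.length = n ∧
  (∀ i, PvReach G art n nums u i → res.getD i 0 = curr) ∧
  (∀ i, ¬ PvReach G art n nums u i → res.getD i 0 = nums.getD i 0)

lemma pvGetD_set_self (l : List Int) (u : Nat) (a : Int) (h : u < l.length) :
    (l.set u a).getD u 0 = a := by
  simp [List.getD_eq_getElem?_getD, h]

lemma pvGetD_set_ne (l : List Int) (u i : Nat) (a : Int) (h : i ≠ u) :
    (l.set u a).getD i 0 = l.getD i 0 := by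
  simp [List.getD_eq_getElem?_getD, List.getElem?_set_ne (Ne.symm h)]

lemma pvChar_unique (G : List (List Int)) (art : List Bool) (n : Nat) (nums : List Int)
    (u : Nat) (curr : Int) (r1 r2 : List Int)
    (h1 : PvChar G art n nums u curr r1) (h2 : PvChar G art n nums u curr r2) : r1 = r2 := by
  obtain ⟨l1, p1, q1⟩ := h1
  obtain ⟨l2, p2, q2⟩ := h2
  refine List.ext_getElem (by omega) (fun i hi1 hi2 => ?_)
  rw [← List.getD_eq_getElem r1 0 hi1, ← List.getD_eq_getElem r2 0 hi2]
  by_cases hr : PvReach G art n nums u i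
  · rw [p1 i hr, p2 i hr]
  · rw [q1 i hr, q2 i hr]

-- number of unvisited entries, as a Finset card (proof-side measure for A's recursion only)
def pvCnt (nums : List Int) : Nat :=
  ((Finset.range nums.length).filter (fun i => nums.getD i 0 = -1)).card

lemma pvCnt_le (nums : List Int) : pvCnt nums ≤ nums.length := by
  unfold pvCnt
  exact le_trans (Finset.card_filter_le _ _) (by simp)

lemma pvCnt_lt (nums ns : List Int) (hlen : ns.length = nums.length)
    (h1 : ∀ i, ns.getD i 0 = -1 → nums.getD i 0 = -1)
    (j : Nat) (hj : j < nums.length) (h2 : nums.getD j 0 = -1) (h3 : ns.getD j 0 ≠ -1) :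
    pvCnt ns < pvCnt nums := by
  unfold pvCnt
  apply Finset.card_lt_card
  constructor
  · intro i hi
    simp only [Finset.mem_filter, Finset.mem_range, hlen] at hi ⊢
    exact ⟨hi.1, h1 i hi.2⟩
  · intro hsub
    have := hsub (by simp only [Finset.mem_filter, Finset.mem_range]; exact ⟨hj, h2⟩)
    simp only [Finset.mem_filter, Finset.mem_range, hlen] at this
    exact h3 this.2

-- reach over a further-marked array lies inside reach over the original array
lemma pvReach_mono (G : List (List Int)) (art : List Bool) (n : Nat) (nums ns : List Int)
    (u k : Nat) (hmind : ∀ i, ns.getD i 0 = -1 → nums.getD i 0 = -1)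
    (hk : PvReach G art n nums u k) :
    ∀ i, PvReach G art n ns k i → PvReach G art n nums u i := by
  intro i hi
  induction hi with
  | refl => exact hk
  | step x v hx hv he hm ha ih => exact PvReach.step x v ih hv he (hmind v hm) ha

lemma pvReach_closed (G : List (List Int)) (art : List Bool) (n : Nat) (nums : List Int)
    (u : Nat) (S : Nat → Prop) (hSu : S u)
    (hcl : ∀ x, S x → ∀ v, v < n → pvEdge G x v → nums.getD v 0 = -1 →
      art.getD v false = false → S v) :
    ∀ i, PvReach G art n nums u i → S i := by
  intro i hi
  induction hi with
  | refl => exact hSu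
  | step x v hx hv he hm ha ih => exact hcl x ih v hv he hm ha

lemma pvReach_cases (G : List (List Int)) (art : List Bool) (n : Nat) (ns : List Int)
    (k : Nat) : ∀ i, PvReach G art n ns k i → i = k ∨ ns.getD i 0 = -1 := by
  intro i hi
  induction hi with
  | refl => exact Or.inl rfl
  | step x v _ _ _ hm _ _ => exact Or.inr hm

lemma pvReach_lt (G : List (List Int)) (art : List Bool) (n : Nat) (nums : List Int)
    (k : Nat) (hk : k < n) : ∀ i, PvReach G art n nums k i → i < n := by
  intro i hi
  induction hi with
  | refl => exact hk
  | step x v _ hv _ _ _ _ => exact hv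

-- invariant of the inner `for v in range(n)` loop of A's dfs, for one fuel level
lemma dfsA_fold (G : List (List Int)) (art : List Bool) (n : Nat) (curr : Int)
    (hcur : curr ≠ -1) (fuel : Nat)
    (IH : ∀ (nums : List Int) (u : Nat), nums.length = n → u < n →
      nums.getD u 0 = -1 → art.getD u false = false → pvCnt nums ≤ fuel →
      PvChar G art n nums u curr (pvDfsA G art n curr fuel u nums))
    (nums : List Int) (u : Nat) (hlen : nums.length = n) (hu : u < n)
    (hnu : nums.getD u 0 = -1) (hart : art.getD u false = false)
    (hfuel : pvCnt nums ≤ fuel + 1) :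
    ∀ k, k ≤ n →
      ∃ S : Nat → Prop,
        (((List.range k).foldl
          (fun ns v =>
            if ((G.getD u []).getD v 0 != 0) && (ns.getD v 0 == -1) && !(art.getD v false)
            then pvDfsA G art n curr fuel v ns
            else ns)
          (nums.set u curr)).length = n ∧ S u ∧
        (∀ i, S i → ((List.range k).foldl
          (fun ns v =>
            if ((G.getD u []).getD v 0 != 0) && (ns.getD v 0 == -1) && !(art.getD v false)
            then pvDfsA G art n curr fuel v ns
            else ns)
          (nums.set u curr)).getD i 0 = curr) ∧
        (∀ i, ¬ S i → ((List.range k).foldl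
          (fun ns v =>
            if ((G.getD u []).getD v 0 != 0) && (ns.getD v 0 == -1) && !(art.getD v false)
            then pvDfsA G art n curr fuel v ns
            else ns)
          (nums.set u curr)).getD i 0 = nums.getD i 0) ∧
        (∀ i, S i → PvReach G art n nums u i ∧ i < n) ∧
        (∀ x, S x → ∀ v, v < n → pvEdge G x v → nums.getD v 0 = -1 →
          art.getD v false = false → ((x = u → v < k → S v) ∧ (x ≠ u → S v)))) := by
  intro k
  induction k with
  | zero =>
    intro _
    refine ⟨fun i => i = u, ?_, rfl, ?_, ?_, ?_, ?_⟩
    · simp [hlen]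
    · rintro i rfl
      exact pvGetD_set_self nums i curr (hlen ▸ hu)
    · intro i hi
      exact pvGetD_set_ne nums u i curr hi
    · rintro i rfl
      exact ⟨PvReach.refl, hu⟩
    · rintro x rfl v _ _ _ _
      exact ⟨fun _ h => absurd h (Nat.not_lt_zero v), fun h => absurd rfl h⟩
  | succ k ih =>
    intro hk1
    have hkn : k < n := hk1
    obtain ⟨S, hL, hSu, hmark, hunch, hsub, hcl⟩ := ih (Nat.le_of_lt hkn)
    set body := fun (ns : List Int) (v : Nat) =>
      if ((G.getD u []).getD v 0 != 0) && (ns.getD v 0 == -1) && !(art.getD v false)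
      then pvDfsA G art n curr fuel v ns
      else ns with hbody
    set ns := (List.range k).foldl body (nums.set u curr) with hns
    have hstep : (List.range (k+1)).foldl body (nums.set u curr) = body ns k := by
      rw [List.range_succ, List.foldl_append, List.foldl_cons, List.foldl_nil]
    by_cases hc : (((G.getD u []).getD k 0 != 0) && (ns.getD k 0 == -1) && !(art.getD k false)) = true
    · -- recursive call at column k
      obtain ⟨⟨hek, hnk⟩, hak⟩ : ((G.getD u []).getD k 0 ≠ 0 ∧ ns.getD k 0 = -1) ∧
          art.getD k false = false := by
        simpa only [bne_iff_ne, Bool.and_eq_true, beq_iff_eq, Bool.not_eq_true'] using hc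
      have hbk : body ns k = pvDfsA G art n curr fuel k ns := by
        simp only [hbody]
        rw [if_pos hc]
      have hSk : ¬ S k := fun h => hcur (by rw [← hmark k h, hnk])
      have hnumk : nums.getD k 0 = -1 := by rw [← hunch k hSk, hnk]
      have h1 : ∀ i, ns.getD i 0 = -1 → nums.getD i 0 = -1 := by
        intro i hi
        by_cases hSi : S i
        · exact absurd (by rw [← hmark i hSi, hi]) hcur
        · rw [← hunch i hSi, hi]
      have hcntlt : pvCnt ns < pvCnt nums := by
        refine pvCnt_lt nums ns (by omega) h1 u (by omega) hnu ?_
        rw [hmark u hSu]; exact hcur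
      have hcnt : pvCnt ns ≤ fuel := by omega
      have hchar := IH ns k hL hkn hnk hak hcnt
      obtain ⟨cL, cmark, cunch⟩ := hchar
      have hRk : PvReach G art n nums u k := PvReach.step u k PvReach.refl hkn hek hnumk hak
      have hsubR : ∀ i, PvReach G art n ns k i → PvReach G art n nums u i :=
        pvReach_mono G art n nums ns u k h1 hRk
      refine ⟨fun i => S i ∨ PvReach G art n ns k i, ?_, Or.inl hSu, ?_, ?_, ?_, ?_⟩
      · rw [hstep, hbk]
        exact cL
      · rw [hstep, hbk]
        rintro i (hSi | hri)
        · by_cases hri : PvReach G art n ns k i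
          · exact cmark i hri
          · rw [cunch i hri]; exact hmark i hSi
        · exact cmark i hri
      · rw [hstep, hbk]
        intro i hi
        push Not at hi
        rw [cunch i hi.2]
        exact hunch i hi.1
      · rintro i (hSi | hri)
        · exact hsub i hSi
        · exact ⟨hsubR i hri, pvReach_lt G art n ns k hkn i hri⟩
      · rintro x (hSx | hrx) v hv he hm ha
        · refine ⟨fun hxu hvk1 => ?_, fun hxu => Or.inl ((hcl x hSx v hv he hm ha).2 hxu)⟩
          rcases Nat.lt_succ_iff_lt_or_eq.mp hvk1 with hvk | rfl
          · exact Or.inl ((hcl x hSx v hv he hm ha).1 hxu hvk)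
          · exact Or.inr PvReach.refl
        · have hxu : x ≠ u := by
            intro hxeq
            have hxc : ns.getD x 0 = curr := by rw [hxeq]; exact hmark u hSu
            rcases pvReach_cases G art n ns k x hrx with rfl | hxm
            · exact hcur (by rw [← hxc, hnk])
            · exact hcur (by rw [← hxc, hxm])
          refine ⟨fun h => absurd h hxu, fun _ => ?_⟩
          by_cases hSv : S v
          · exact Or.inl hSv
          · have : ns.getD v 0 = -1 := by rw [hunch v hSv]; exact hm
            exact Or.inr (PvReach.step x v hrx hv he this ha)
    · -- column k not eligible: state unchanged
      have hbk : body ns k = ns := by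
        simp only [hbody]
        rw [if_neg hc]
      refine ⟨S, ?_, hSu, ?_, ?_, hsub, ?_⟩
      · rw [hstep, hbk]; exact hL
      · rw [hstep, hbk]; exact hmark
      · rw [hstep, hbk]; exact hunch
      · intro x hSx v hv he hm ha
        refine ⟨fun hxu hvk1 => ?_, (hcl x hSx v hv he hm ha).2⟩
        rcases Nat.lt_succ_iff_lt_or_eq.mp hvk1 with hvk | rfl
        · exact (hcl x hSx v hv he hm ha).1 hxu hvk
        · -- v = k: show S k; the guard failed, but edge and art hold, so ns[k] ≠ -1
          subst hxu
          by_contra hSk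
          have : ns.getD v 0 = -1 := by rw [hunch v hSk]; exact hm
          exact hc (by
            simp only [bne_iff_ne, Bool.and_eq_true, beq_iff_eq, Bool.not_eq_true']
            exact ⟨⟨he, this⟩, ha⟩)

-- the A-side dfs computes exactly the marking of the reachable set
lemma dfsA_spec (G : List (List Int)) (art : List Bool) (n : Nat) (curr : Int)
    (hcur : curr ≠ -1) :
    ∀ (fuel : Nat) (nums : List Int) (u : Nat), nums.length = n → u < n →
      nums.getD u 0 = -1 → art.getD u false = false → pvCnt nums ≤ fuel →
      PvChar G art n nums u curr (pvDfsA G art n curr fuel u nums) := by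
  intro fuel
  induction fuel with
  | zero =>
    intro nums u hlen hu hnu _ hfuel
    exfalso
    have : u ∈ (Finset.range nums.length).filter (fun i => nums.getD i 0 = -1) := by
      simp only [Finset.mem_filter, Finset.mem_range]
      exact ⟨by omega, hnu⟩
    have := Finset.card_pos.mpr ⟨u, this⟩
    unfold pvCnt at hfuel
    omega
  | succ fuel ih =>
    intro nums u hlen hu hnu hart hfuel
    obtain ⟨S, hL, hSu, hmark, hunch, hsub, hcl⟩ :=
      dfsA_fold G art n curr hcur fuel ih nums u hlen hu hnu hart hfuel n le_rfl
    have hclosed : ∀ x, S x → ∀ v, v < n → pvEdge G x v → nums.getD v 0 = -1 →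
        art.getD v false = false → S v := by
      intro x hSx v hv he hm ha
      by_cases hxu : x = u
      · exact (hcl x hSx v hv he hm ha).1 hxu hv
      · exact (hcl x hSx v hv he hm ha).2 hxu
    have hRS : ∀ i, PvReach G art n nums u i → S i := pvReach_closed G art n nums u S hSu hclosed
    show PvChar G art n nums u curr
      ((List.range n).foldl
        (fun ns v =>
          if ((G.getD u []).getD v 0 != 0) && (ns.getD v 0 == -1) && !(art.getD v false)
          then pvDfsA G art n curr fuel v ns
          else ns)
        (nums.set u curr))
    exact ⟨hL, fun i hi => hmark i (hRS i hi), fun i hi => hunch i (fun hSi => hi (hsub i hSi).1)⟩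

-- ===== B-side lemmas =====

-- one row scan of B's level loop: it appends exactly a block d of fresh eligible columns,
-- the same block to comp and to the next frontier
lemma rowB_fold (G : List (List Int)) (art : List Bool) (nums : List Int) (y : Nat) :
    ∀ (k : Nat) (p : List Nat × List Nat), ∃ d : List Nat,
      (List.range k).foldl
        (fun (q : List Nat × List Nat) v =>
          if ((G.getD y []).getD v 0 != 0) && (nums.getD v 0 == -1) && !(q.1.contains v)
              && !(art.getD v false)
          then (q.1 ++ [v], q.2 ++ [v])
          else q)
        p = (p.1 ++ d, p.2 ++ d) ∧
      d.Nodup ∧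
      (∀ w ∈ d, w ∉ p.1 ∧ w < k ∧ pvEdge G y w ∧ nums.getD w 0 = -1 ∧
        art.getD w false = false) ∧
      (∀ v, v < k → pvEdge G y v → nums.getD v 0 = -1 → art.getD v false = false →
        v ∈ p.1 ++ d) := by
  intro k
  induction k with
  | zero =>
    intro p
    exact ⟨[], by simp, by simp, by simp, fun v hv => absurd hv (Nat.not_lt_zero v)⟩
  | succ k ih =>
    intro p
    obtain ⟨d, heq, hnd, hprops, hcov⟩ := ih p
    set body := fun (q : List Nat × List Nat) v =>
      if ((G.getD y []).getD v 0 != 0) && (nums.getD v 0 == -1) && !(q.1.contains v)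
          && !(art.getD v false)
      then (q.1 ++ [v], q.2 ++ [v])
      else q with hbody
    have hstep : (List.range (k+1)).foldl body p = body ((List.range k).foldl body p) k := by
      rw [List.range_succ, List.foldl_append, List.foldl_cons, List.foldl_nil]
    rw [heq] at hstep
    by_cases hc : (((G.getD y []).getD k 0 != 0) && (nums.getD k 0 == -1)
        && !((p.1 ++ d).contains k) && !(art.getD k false)) = true
    · obtain ⟨⟨⟨hek, hmk⟩, hck⟩, hak⟩ : (((G.getD y []).getD k 0 ≠ 0 ∧ nums.getD k 0 = -1) ∧
          k ∉ p.1 ++ d) ∧ art.getD k false = false := by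
        simpa only [bne_iff_ne, Bool.and_eq_true, beq_iff_eq, Bool.not_eq_true',
          List.contains_eq_mem, decide_eq_false_iff_not] using hc
      refine ⟨d ++ [k], ?_, ?_, ?_, ?_⟩
      · rw [hstep]
        simp only [hbody]
        rw [if_pos hc]
        simp [List.append_assoc]
      · have hkd : k ∉ d := fun h => hck (List.mem_append_right _ h)
        rw [List.nodup_append]
        refine ⟨hnd, List.nodup_singleton _, ?_⟩
        intro a ha b hb
        rw [List.mem_singleton] at hb
        subst hb
        exact fun h => hkd (h ▸ ha)
      · intro w hw
        rcases List.mem_append.mp hw with hw | hw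
        · obtain ⟨h1, h2, h3, h4, h5⟩ := hprops w hw
          exact ⟨h1, Nat.lt_succ_of_lt h2, h3, h4, h5⟩
        · rw [List.mem_singleton] at hw
          rw [hw]
          exact ⟨fun h => hck (List.mem_append_left _ h), Nat.lt_succ_self _, hek, hmk, hak⟩
      · intro v hv he hm ha
        rcases Nat.lt_succ_iff_lt_or_eq.mp hv with hv | rfl
        · have := hcov v hv he hm ha
          rw [← List.append_assoc]
          exact List.mem_append_left _ this
        · rw [← List.append_assoc]
          exact List.mem_append_right _ (List.mem_singleton.mpr rfl)
    · refine ⟨d, ?_, hnd, ?_, ?_⟩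
      · rw [hstep]
        simp only [hbody]
        rw [if_neg hc]
      · intro w hw
        obtain ⟨h1, h2, h3, h4, h5⟩ := hprops w hw
        exact ⟨h1, Nat.lt_succ_of_lt h2, h3, h4, h5⟩
      · intro v hv he hm ha
        rcases Nat.lt_succ_iff_lt_or_eq.mp hv with hv | rfl
        · exact hcov v hv he hm ha
        · by_contra hvm
          exact hc (by
            simp only [bne_iff_ne, Bool.and_eq_true, beq_iff_eq, Bool.not_eq_true',
              List.contains_eq_mem, decide_eq_false_iff_not]
            exact ⟨⟨⟨he, hm⟩, hvm⟩, ha⟩)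

-- the scan of a whole frontier: the same fresh block d goes to comp and to the next frontier,
-- and every eligible successor of a frontier vertex ends up in comp ++ d
lemma frontB_fold (G : List (List Int)) (art : List Bool) (n : Nat) (nums : List Int) :
    ∀ (ys : List Nat) (p : List Nat × List Nat), ∃ d : List Nat,
      ys.foldl
        (fun (p : List Nat × List Nat) y =>
          (List.range n).foldl
            (fun (q : List Nat × List Nat) v =>
              if ((G.getD y []).getD v 0 != 0) && (nums.getD v 0 == -1) && !(q.1.contains v)
                  && !(art.getD v false)
              then (q.1 ++ [v], q.2 ++ [v])
              else q)
            p)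
        p = (p.1 ++ d, p.2 ++ d) ∧
      d.Nodup ∧
      (∀ w ∈ d, w ∉ p.1 ∧ w < n ∧ nums.getD w 0 = -1 ∧ art.getD w false = false ∧
        ∃ y ∈ ys, pvEdge G y w) ∧
      (∀ y ∈ ys, ∀ v, v < n → pvEdge G y v → nums.getD v 0 = -1 →
        art.getD v false = false → v ∈ p.1 ++ d) := by
  intro ys
  induction ys with
  | nil =>
    intro p
    exact ⟨[], by simp, by simp, by simp, by simp⟩
  | cons y ys ih =>
    intro p
    obtain ⟨d1, heq1, hnd1, hprops1, hcov1⟩ := rowB_fold G art nums y n p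
    obtain ⟨d2, heq2, hnd2, hprops2, hcov2⟩ := ih (p.1 ++ d1, p.2 ++ d1)
    refine ⟨d1 ++ d2, ?_, ?_, ?_, ?_⟩
    · rw [List.foldl_cons, heq1, heq2]
      simp [List.append_assoc]
    · rw [List.nodup_append]
      refine ⟨hnd1, hnd2, ?_⟩
      intro a ha1 b hb2
      intro heqab
      exact (hprops2 b hb2).1 (List.mem_append_right _ (heqab ▸ ha1))
    · intro w hw
      rcases List.mem_append.mp hw with hw | hw
      · obtain ⟨h1, h2, h3, h4, h5⟩ := hprops1 w hw
        exact ⟨h1, h2, h4, h5, y, List.mem_cons_self, h3⟩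
      · obtain ⟨h1, h2, h3, h4, h5⟩ := hprops2 w hw
        obtain ⟨y', hy', he'⟩ := h5
        exact ⟨fun h => h1 (List.mem_append_left _ h), h2, h3, h4,
          y', List.mem_cons_of_mem y hy', he'⟩
    · intro y' hy' v hv he hm ha
      rw [← List.append_assoc]
      rcases List.mem_cons.mp hy' with rfl | hy'
      · exact List.mem_append_left _ (hcov1 v hv he hm ha)
      · exact hcov2 y' hy' v hv he hm ha

-- the level loop collects exactly a closed, reachable superset of comp
lemma levelB_spec (G : List (List Int)) (art : List Bool) (n : Nat) (nums : List Int)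
    (u : Nat) :
    ∀ (fuel : Nat) (comp frontier : List Nat),
      comp.Nodup →
      (∀ i ∈ comp, PvReach G art n nums u i ∧ i < n) →
      u ∈ comp →
      (∀ x ∈ frontier, x ∈ comp) →
      (∀ y ∈ comp, y ∉ frontier → ∀ v, v < n → pvEdge G y v → nums.getD v 0 = -1 →
        art.getD v false = false → v ∈ comp) →
      (frontier = [] ∨ n + 2 ≤ fuel + comp.length) →
      u ∈ pvLevelB G art n nums fuel comp frontier ∧
      (∀ i ∈ pvLevelB G art n nums fuel comp frontier, PvReach G art n nums u i ∧ i < n) ∧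
      (∀ y ∈ pvLevelB G art n nums fuel comp frontier, ∀ v, v < n → pvEdge G y v →
        nums.getD v 0 = -1 → art.getD v false = false →
        v ∈ pvLevelB G art n nums fuel comp frontier) := by
  intro fuel
  induction fuel with
  | zero =>
    intro comp frontier hnd hmem hu hfr hcl hfuel
    have hfr0 : frontier = [] := by
      rcases hfuel with h | h
      · exact h
      · exfalso
        have hsub : comp ⊆ List.range n := fun i hi => List.mem_range.mpr (hmem i hi).2
        have := (hnd.subperm hsub).length_le
        simp only [List.length_range] at this
        omega
    subst hfr0
    exact ⟨hu, hmem, fun y hy => hcl y hy (by simp)⟩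
  | succ fuel ih =>
    intro comp frontier hnd hmem hu hfr hcl hfuel
    match frontier with
    | [] => exact ⟨hu, hmem, fun y hy => hcl y hy (by simp)⟩
    | x :: rest =>
      obtain ⟨d, heq, hnd', hprops, hcov⟩ := frontB_fold G art n nums (x :: rest) (comp, [])
      show (fun r => u ∈ r ∧ (∀ i ∈ r, PvReach G art n nums u i ∧ i < n) ∧
        (∀ y ∈ r, ∀ v, v < n → pvEdge G y v → nums.getD v 0 = -1 →
          art.getD v false = false → v ∈ r))
        (pvLevelB G art n nums (fuel+1) comp (x :: rest))
      have hunf : pvLevelB G art n nums (fuel+1) comp (x :: rest)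
          = pvLevelB G art n nums fuel (comp ++ d) d := by
        show pvLevelB G art n nums fuel
          ((x :: rest).foldl _ (comp, [])).1 ((x :: rest).foldl _ (comp, [])).2
          = pvLevelB G art n nums fuel (comp ++ d) d
        rw [heq]
        rfl
      rw [hunf]
      refine ih (comp ++ d) d ?_ ?_ (List.mem_append_left _ hu)
        (fun x hx => List.mem_append_right _ hx) ?_ ?_
      · rw [List.nodup_append]
        refine ⟨hnd, hnd', ?_⟩
        intro a ha1 b hb2
        intro heqab
        exact (hprops b hb2).1 (heqab ▸ ha1)
      · intro i hi
        rcases List.mem_append.mp hi with hi | hi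
        · exact hmem i hi
        · obtain ⟨h1, h2, h3, h4, y, hy, he⟩ := hprops i hi
          exact ⟨PvReach.step y i (hmem y (hfr y hy)).1 h2 he h3 h4, h2⟩
      · intro y hy hyd v hv he hm ha
        rcases List.mem_append.mp hy with hy | hy
        · by_cases hyf : y ∈ x :: rest
          · exact hcov y hyf v hv he hm ha
          · exact List.mem_append_left _ (hcl y hy hyf v hv he hm ha)
        · exact absurd hy hyd
      · rcases eq_or_ne d [] with rfl | hdne
        · exact Or.inl rfl
        · refine Or.inr ?_
          have hd1 : 1 ≤ d.length := List.length_pos_iff.mpr hdne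
          have : n + 2 ≤ fuel + 1 + comp.length := by
            rcases hfuel with h | h
            · exact absurd h (by simp)
            · exact h
          rw [List.length_append]
          omega

-- the write pass: every collected index (below the length) gets curr, nothing else moves
lemma writeB_length (c : Int) :
    ∀ (l : List Nat) (nums : List Int),
      (l.foldl (fun ns v => ns.set v c) nums).length = nums.length := by
  intro l
  induction l with
  | nil => intro nums; rfl
  | cons v l ih =>
    intro nums
    rw [List.foldl_cons, ih, List.length_set]

lemma writeB_getD (c : Int) :
    ∀ (l : List Nat) (nums : List Int) (i : Nat),
      (l.foldl (fun ns v => ns.set v c) nums).getD i 0 =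
        if i ∈ l ∧ i < nums.length then c else nums.getD i 0 := by
  intro l
  induction l with
  | nil =>
    intro nums i
    simp
  | cons v l ih =>
    intro nums i
    rw [List.foldl_cons, ih, List.length_set]
    by_cases hiv : i = v
    · subst hiv
      by_cases hlen : i < nums.length
      · by_cases hil : i ∈ l
        · rw [if_pos ⟨hil, hlen⟩, if_pos ⟨List.mem_cons_self, hlen⟩]
        · rw [if_neg (fun h => hil h.1), if_pos ⟨List.mem_cons_self, hlen⟩]
          exact pvGetD_set_self nums i c hlen
      · rw [if_neg (fun h => hlen h.2), if_neg (fun h => hlen h.2),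
          List.set_eq_of_length_le (by omega)]
    · rw [show (nums.set v c).getD i 0 = nums.getD i 0 from pvGetD_set_ne nums v i c hiv]
      by_cases hil : i ∈ l
      · by_cases hlen : i < nums.length
        · rw [if_pos ⟨hil, hlen⟩, if_pos ⟨List.mem_cons_of_mem v hil, hlen⟩]
        · rw [if_neg (fun h => hlen h.2), if_neg (fun h => hlen h.2)]
      · rw [if_neg (fun h => hil h.1)]
        have : i ∉ v :: l := by
          rw [List.mem_cons]
          rintro (rfl | h)
          · exact hiv rfl
          · exact hil h
        rw [if_neg (fun h => this h.1)]

-- B's collect-then-write branch also produces the marking of the reachable set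
lemma branchB_char (G : List (List Int)) (art : List Bool) (n : Nat) (nums : List Int)
    (u : Nat) (curr : Int) (hlen : nums.length = n) (hu : u < n) :
    PvChar G art n nums u curr
      ((pvLevelB G art n nums (n + 1) [u] [u]).foldl (fun ns v => ns.set v curr) nums) := by
  obtain ⟨hum, hmem, hcl⟩ := levelB_spec G art n nums u (n + 1) [u] [u]
    (by simp) (by rintro i hi; rw [List.mem_singleton] at hi; subst hi; exact ⟨PvReach.refl, hu⟩)
    (List.mem_singleton.mpr rfl) (fun x hx => hx)
    (by
      intro y hy hyn
      rw [List.mem_singleton] at hy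
      exact absurd (List.mem_singleton.mpr hy) hyn)
    (Or.inr (by simp))
  set comp := pvLevelB G art n nums (n + 1) [u] [u] with hcomp
  have hRcomp : ∀ i, PvReach G art n nums u i → i ∈ comp :=
    pvReach_closed G art n nums u (· ∈ comp) hum hcl
  refine ⟨by rw [writeB_length, hlen], ?_, ?_⟩
  · intro i hi
    rw [writeB_getD]
    have : i ∈ comp ∧ i < nums.length := ⟨hRcomp i hi, by rw [hlen]; exact (hmem i (hRcomp i hi)).2⟩
    rw [if_pos this]
  · intro i hi
    rw [writeB_getD]
    have : ¬ (i ∈ comp ∧ i < nums.length) := fun h => hi (hmem i h.1).1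
    rw [if_neg this]

-- the two component passes agree
lemma branch_eq (G : List (List Int)) (art : List Bool) (n : Nat) (curr : Int)
    (hcur : curr ≠ -1) (nums : List Int) (u : Nat) (hlen : nums.length = n) (hu : u < n)
    (hnu : nums.getD u 0 = -1) (hart : art.getD u false = false) :
    pvDfsA G art n curr (n + 1) u nums
      = (pvLevelB G art n nums (n + 1) [u] [u]).foldl (fun ns v => ns.set v curr) nums ∧
    (pvDfsA G art n curr (n + 1) u nums).length = n := by
  have hcnt : pvCnt nums ≤ n := hlen ▸ pvCnt_le nums
  have hA := dfsA_spec G art n curr hcur (n + 1) nums u hlen hu hnu hart (by omega)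
  have hB := branchB_char G art n nums u curr hlen hu
  exact ⟨pvChar_unique G art n nums u curr _ _ hA hB, hA.1⟩

-- the outer `for u in range(n)` loop: both programs step through equal states
lemma outer_fold (G : List (List Int)) (art : List Bool) :
    ∀ (l : List Nat), (∀ u, u ∈ l → u < G.length) → ∀ (st : List Int × Int),
      st.1.length = G.length → 0 ≤ st.2 →
      l.foldl
        (fun (st : List Int × Int) u =>
          if st.1.getD u 0 == -1 then
            if !(art.getD u false) then (pvDfsA G art G.length st.2 (G.length + 1) u st.1, st.2 + 1)
            else (st.1.set u st.2, st.2 + 1)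
          else st) st
        = l.foldl
        (fun (st : List Int × Int) u =>
          if !(st.1.getD u 0 == -1) then st
          else if art.getD u false then (st.1.set u st.2, st.2 + 1)
          else
            ((pvLevelB G art G.length st.1 (G.length + 1) [u] [u]).foldl
              (fun ns v => ns.set v st.2) st.1, st.2 + 1)) st ∧
      (l.foldl
        (fun (st : List Int × Int) u =>
          if st.1.getD u 0 == -1 then
            if !(art.getD u false) then (pvDfsA G art G.length st.2 (G.length + 1) u st.1, st.2 + 1)
            else (st.1.set u st.2, st.2 + 1)
          else st) st).1.length = G.length ∧
      0 ≤ (l.foldl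
        (fun (st : List Int × Int) u =>
          if st.1.getD u 0 == -1 then
            if !(art.getD u false) then (pvDfsA G art G.length st.2 (G.length + 1) u st.1, st.2 + 1)
            else (st.1.set u st.2, st.2 + 1)
          else st) st).2 := by
  intro l
  induction l with
  | nil =>
    intro _ st h1 h2
    exact ⟨rfl, h1, h2⟩
  | cons u l ih =>
    intro hmem st h1 h2
    have hu : u < G.length := hmem u (List.mem_cons_self)
    have hmem' : ∀ v, v ∈ l → v < G.length := fun v hv => hmem v (List.mem_cons_of_mem u hv)
    simp only [List.foldl_cons]
    by_cases hg : (st.1.getD u 0 == -1) = true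
    · have hnu : st.1.getD u 0 = -1 := by simpa using hg
      have hgB : ¬ ((!(st.1.getD u 0 == -1)) = true) := by rw [hg]; simp
      by_cases ha : art.getD u false = true
      · have haA : ¬ ((!(art.getD u false)) = true) := by rw [ha]; simp
        rw [if_pos hg, if_neg haA, if_neg hgB, if_pos ha]
        exact ih hmem' _ (by simp [h1]) (by omega)
      · have ha' : art.getD u false = false := by simpa using ha
        have haA : ((!(art.getD u false)) = true) := by rw [ha']; rfl
        have hb := branch_eq G art G.length st.2 (by omega) st.1 u h1 hu hnu ha'
        rw [if_pos hg, if_pos haA, if_neg hgB, if_neg ha, hb.1]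
        exact ih hmem' _ (hb.1 ▸ hb.2) (by omega)
    · have hg' : (st.1.getD u 0 == -1) = false := eq_false_of_ne_true hg
      have hgB : ((!(st.1.getD u 0 == -1)) = true) := by rw [hg']; rfl
      rw [if_neg hg, if_pos hgB]
      exact ih hmem' st h1 h2

-- ===== VERDICT (by name: the statement is the Claim_ definition above) =====
theorem number_components_spec : Claim_equal_number_components := by
  intro G is_art _ _
  show number_components G is_art = number_components_alt G is_art
  unfold number_components number_components_alt
  exact congrArg Prod.fst
    (outer_fold G is_art (List.range G.length) (fun u hu => List.mem_range.mp hu)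
      (List.replicate G.length (-1), 0) (by simp) le_rfl).1
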